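-- pv_equiv track=rewrite | github.com/ShajahanAI/codewars | python/6 kyu/64.py | deaf_grandma
-- ===== SOURCE A (Python) =====
-- def deaf_grandma(you):
--     grandmas_replies = []
--     for sentence in you:
--         if sentence.isupper():
--             if sentence == "BYE":
--                 # end the conversation
--                 grandmas_replies.append("OK, BYE!")
--                 break
--
--             # you're shouting
--             grandmas_replies.append("NO, NOT SINCE 1938!")
--         else:
--             grandmas_replies.append("HUH?! SPEAK UP, SONNY!")
--
--     return grandmas_replies
-- ===== SOURCE B (Python) =====
-- def deaf_grandma(you):
--     cut = you.index("BYE") if "BYE" in you else len(you)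
--     replies = ["NO, NOT SINCE 1938!" if s.isupper() else "HUH?! SPEAK UP, SONNY!"
--                for s in you[:cut]]
--     if cut < len(you):
--         replies.append("OK, BYE!")
--     return replies
-- ===== Notes on version B (the rewrite author's own statement) =====
-- stated objective: simpler
-- what changed: B first locates the terminating "BYE" with index/membership, maps the prefix before it to replies in one comprehension, and appends "OK, BYE!" if found, instead of A's single interleaved loop with a break.
import Mathlib
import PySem

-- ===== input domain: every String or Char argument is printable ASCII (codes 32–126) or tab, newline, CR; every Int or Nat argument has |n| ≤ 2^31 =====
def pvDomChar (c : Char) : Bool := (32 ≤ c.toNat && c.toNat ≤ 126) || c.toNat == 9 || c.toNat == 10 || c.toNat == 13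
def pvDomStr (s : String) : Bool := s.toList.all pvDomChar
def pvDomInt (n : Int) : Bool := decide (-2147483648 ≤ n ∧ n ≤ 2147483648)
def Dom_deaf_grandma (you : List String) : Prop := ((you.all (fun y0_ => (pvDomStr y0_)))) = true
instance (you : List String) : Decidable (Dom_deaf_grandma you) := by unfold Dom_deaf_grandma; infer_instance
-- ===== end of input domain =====

-- B first finds the "BYE" terminator, then maps the prefix to replies in one pass; simpler decomposition than A's interleaved loop with break.

-- Python str.isupper() for ASCII strings (the stated domain): at least one cased (= alpha) char and no lowercase char.
-- Exact on the ASCII domain; ported by hand since PySem has only char-level isupper/islower.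
def pyStrIsupper (s : String) : Bool :=
  s.toList.any (fun c => PySem.Chars.isalpha c) && s.toList.all (fun c => !PySem.Chars.islower c)

-- ===== PORT A =====
-- A's loop with break, transliterated as structural recursion over the list.
def deaf_grandma (you : List String) : List String :=
  match you with
  | [] => []
  | sentence :: rest =>
    if pyStrIsupper sentence then
      if sentence = "BYE" then ["OK, BYE!"]
      else "NO, NOT SINCE 1938!" :: deaf_grandma rest
    else "HUH?! SPEAK UP, SONNY!" :: deaf_grandma rest

-- ===== PORT B =====
def deaf_grandma_alt (you : List String) : List String :=
  match PySem.List.index? you "BYE" with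
  | some cut =>
      (PySem.List.slice you none (some (cut : Int))).map
        (fun s => if pyStrIsupper s then "NO, NOT SINCE 1938!" else "HUH?! SPEAK UP, SONNY!")
      ++ ["OK, BYE!"]
  | none =>
      you.map (fun s => if pyStrIsupper s then "NO, NOT SINCE 1938!" else "HUH?! SPEAK UP, SONNY!")

-- ===== PRECONDITION & SPEC =====
def Spec_deaf_grandma (you : List String) (out : List String) : Prop := out = deaf_grandma_alt you
instance (you : List String) (out : List String) : Decidable (Spec_deaf_grandma you out) := by unfold Spec_deaf_grandma; infer_instance

-- ===== CLAIM (what is proved, stated in full; the proofs are below) =====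
def Claim_equal_deaf_grandma : Prop := ∀ (you : List String), Dom_deaf_grandma you → Spec_deaf_grandma you (deaf_grandma you)

-- ===== LEMMAS AND PROOFS =====

theorem isupper_BYE : pyStrIsupper "BYE" = true := by decide

theorem alt_some (you : List String) (k : Nat)
    (h : PySem.List.index? you "BYE" = some k) :
    deaf_grandma_alt you
      = (you.take k).map
          (fun s => if pyStrIsupper s then "NO, NOT SINCE 1938!" else "HUH?! SPEAK UP, SONNY!")
        ++ ["OK, BYE!"] := by
  unfold deaf_grandma_alt
  rw [h]
  simp [PySem.List.slice_to_natCast]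

theorem alt_none (you : List String)
    (h : PySem.List.index? you "BYE" = none) :
    deaf_grandma_alt you
      = you.map
          (fun s => if pyStrIsupper s then "NO, NOT SINCE 1938!" else "HUH?! SPEAK UP, SONNY!") := by
  unfold deaf_grandma_alt
  rw [h]

theorem alt_eq (you : List String) : deaf_grandma you = deaf_grandma_alt you := by
  induction you with
  | nil => rfl
  | cons s rest ih =>
    by_cases hb : s = "BYE"
    · subst hb
      rw [alt_some _ 0 (PySem.List.index?_cons_self _ _)]
      simp [deaf_grandma, isupper_BYE]
    · have hA : deaf_grandma (s :: rest)
          = (if pyStrIsupper s then "NO, NOT SINCE 1938!" else "HUH?! SPEAK UP, SONNY!")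
            :: deaf_grandma rest := by
        by_cases hu : pyStrIsupper s <;> simp [deaf_grandma, hu, hb]
      have hidx := PySem.List.index?_cons_of_ne (x := s) (v := "BYE") rest hb
      rw [hA, ih]
      cases hr : PySem.List.index? rest "BYE" with
      | none =>
        rw [alt_none rest hr, alt_none (s :: rest) (by rw [hidx, hr]; rfl)]
        rfl
      | some k =>
        rw [alt_some rest k hr,
            alt_some (s :: rest) (k + 1) (by rw [hidx, hr]; rfl)]
        rw [List.take_succ_cons, List.map_cons, List.cons_append]

-- ===== VERDICT (by name: the statement is the Claim_ definition above) =====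
theorem deaf_grandma_spec : Claim_equal_deaf_grandma := by
  intro you _
  unfold Spec_deaf_grandma
  exact alt_eq you
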